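-- pv_equiv track=rewrite | github.com/bhdaf/AIchess | game.py | _flip_fen
-- ===== SOURCE A (Python) =====
-- def _flip_fen(fen):
--     """翻转FEN（180度旋转 + 大小写互换）"""
--     rows = fen.split('/')
--     flipped_rows = []
--     for row in reversed(rows):
--         flipped_row = ''
--         for ch in reversed(row):
--             if ch.isalpha():
--                 flipped_row += ch.swapcase()
--             else:
--                 flipped_row += ch
--         flipped_rows.append(flipped_row)
--     return '/'.join(flipped_rows)
-- ===== SOURCE B (Python) =====
-- def _flip_fen(fen):
--     """翻转FEN（180度旋转 + 大小写互换）"""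
--     return fen[::-1].swapcase()
-- ===== Notes on version B (the rewrite author's own statement) =====
-- stated objective: simpler
-- what changed: Replaces the split-into-rows / reverse-rows / per-row reversed char-append loop with a single whole-string slice reverse plus swapcase, relying on the row separator being a non-letter fixed by both operations and on swapcase being identity on non-letters; the quadratic string += appends disappear.
import Mathlib
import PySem

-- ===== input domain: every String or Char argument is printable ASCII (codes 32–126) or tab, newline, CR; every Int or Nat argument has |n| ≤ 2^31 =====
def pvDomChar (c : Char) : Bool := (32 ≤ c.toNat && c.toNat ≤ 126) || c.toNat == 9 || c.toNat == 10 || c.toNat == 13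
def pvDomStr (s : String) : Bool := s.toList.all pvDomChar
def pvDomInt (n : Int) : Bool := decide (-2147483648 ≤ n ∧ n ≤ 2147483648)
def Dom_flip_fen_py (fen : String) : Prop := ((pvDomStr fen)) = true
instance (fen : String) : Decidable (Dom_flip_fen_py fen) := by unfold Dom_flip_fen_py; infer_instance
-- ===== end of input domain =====

-- B replaces A's split-rows / reverse-rows / per-row reversed-char loop by one whole-string
-- reverse plus swapcase (simpler; same asymptotic cost).

-- str.swapcase() has no PySem primitive; ported by hand per character (exact on the ASCII domain).
def pvSwap (c : Char) : Char :=
  if PySem.Chars.isupper c then PySem.Chars.lowerChar c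
  else if PySem.Chars.islower c then PySem.Chars.upperChar c
  else c

-- ===== PORT A =====
-- inner loop of A: build flipped_row from reversed(row)
def pvFlipRowA (row : List Char) : List Char :=
  row.reverse.foldl (fun acc ch => if PySem.Chars.isalpha ch then acc ++ [pvSwap ch] else acc ++ [ch]) []

def flip_fen_py (fen : String) : String :=
  let rows := PySem.Chars.splitOn fen.toList ['/']
  let flippedRows := rows.reverse.foldl (fun acc row => acc ++ [pvFlipRowA row]) []
  String.ofList (PySem.Chars.join ['/'] flippedRows)

-- ===== PORT B =====
def flip_fen_py_alt (fen : String) : String :=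
  -- fen[::-1].swapcase(): slice with step -1, then swapcase char by char
  String.ofList (((PySem.List.slice? fen.toList none none (-1)).getD []).map pvSwap)

-- ===== PRECONDITION & SPEC =====
def Spec_flip_fen_py (fen : String) (out : String) : Prop := out = flip_fen_py_alt fen
instance (fen : String) (out : String) : Decidable (Spec_flip_fen_py fen out) := by unfold Spec_flip_fen_py; infer_instance

-- ===== CLAIM (what is proved, stated in full; the proofs are below) =====
def Claim_equal_flip_fen_py : Prop := ∀ (fen : String), Dom_flip_fen_py fen → Spec_flip_fen_py fen (flip_fen_py fen)

-- ===== LEMMAS AND PROOFS =====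

theorem pv_foldl_push {α β : Type} (f : α → β) (l : List α) (a0 : List β) :
    l.foldl (fun acc x => acc ++ [f x]) a0 = a0 ++ l.map f := by
  induction l generalizing a0 with
  | nil => simp
  | cons x xs ih => simp [List.foldl, ih]

theorem pv_if_alpha_swap (c : Char) :
    (if PySem.Chars.isalpha c then pvSwap c else c) = pvSwap c := by
  by_cases h : PySem.Chars.isalpha c = true
  · simp [h]
  · have h2 : PySem.Chars.isupper c = false := by
      simp [PySem.Chars.isalpha] at h; exact h.1
    have h3 : PySem.Chars.islower c = false := by
      simp [PySem.Chars.isalpha] at h; exact h.2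
    simp [h, pvSwap, h2, h3]

theorem pvFlipRowA_eq (row : List Char) :
    pvFlipRowA row = (row.map pvSwap).reverse := by
  unfold pvFlipRowA
  have : (fun (acc : List Char) ch => if PySem.Chars.isalpha ch then acc ++ [pvSwap ch] else acc ++ [ch])
       = (fun acc ch => acc ++ [pvSwap ch]) := by
    funext acc ch
    rw [show (if PySem.Chars.isalpha ch then acc ++ [pvSwap ch] else acc ++ [ch])
          = acc ++ [if PySem.Chars.isalpha ch then pvSwap ch else ch] by split <;> rfl,
        pv_if_alpha_swap]
  rw [this, pv_foldl_push, List.nil_append, ← List.map_reverse]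

theorem pv_intercalate_snoc (sep y : List Char) (zs : List (List Char)) (h : zs ≠ []) :
    sep.intercalate (zs ++ [y]) = sep.intercalate zs ++ sep ++ y := by
  induction zs with
  | nil => exact absurd rfl h
  | cons z zs ih =>
    cases zs with
    | nil => simp [List.intercalate, List.intersperse]
    | cons w ws =>
      have h2 : sep.intercalate (z :: w :: (ws ++ [y])) = z ++ sep ++ sep.intercalate (w :: (ws ++ [y])) := by
        simp [List.intercalate, List.intersperse]
      simp only [List.cons_append]
      rw [h2, show (w :: (ws ++ [y])) = (w :: ws) ++ [y] by simp, ih (by simp)]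
      have : sep.intercalate (z :: w :: ws) = z ++ sep ++ sep.intercalate (w :: ws) := by
        simp [List.intercalate, List.intersperse]
      rw [this]; simp [List.append_assoc]

theorem pv_map_intercalate (f : Char → Char) (sep : List Char) (xs : List (List Char)) :
    (sep.intercalate xs).map f = (sep.map f).intercalate (xs.map (List.map f)) := by
  induction xs with
  | nil => simp [List.intercalate]
  | cons x xs ih =>
    cases xs with
    | nil => simp [List.intercalate, List.intersperse]
    | cons y ys =>
      have h1 : sep.intercalate (x :: y :: ys) = x ++ sep ++ sep.intercalate (y :: ys) := by
        simp [List.intercalate, List.intersperse]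
      have h2 : (sep.map f).intercalate (List.map f x :: List.map f y :: (ys.map (List.map f)))
          = List.map f x ++ sep.map f ++ (sep.map f).intercalate (List.map f y :: ys.map (List.map f)) := by
        simp [List.intercalate, List.intersperse]
      simp only [List.map_cons] at ih ⊢
      rw [h1, h2, ← ih]; simp

theorem pv_reverse_intercalate (sep : List Char) (xs : List (List Char)) :
    (sep.intercalate xs).reverse = sep.reverse.intercalate ((xs.map List.reverse).reverse) := by
  induction xs with
  | nil => simp [List.intercalate]
  | cons x xs ih =>
    cases xs with
    | nil => simp [List.intercalate, List.intersperse]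
    | cons y ys =>
      have h1 : sep.intercalate (x :: y :: ys) = x ++ sep ++ sep.intercalate (y :: ys) := by
        simp [List.intercalate, List.intersperse]
      rw [h1]
      simp only [List.reverse_append]
      rw [ih]
      rw [show (List.map List.reverse (x :: y :: ys)).reverse
            = (List.map List.reverse (y :: ys)).reverse ++ [x.reverse] by simp]
      rw [pv_intercalate_snoc _ _ _ (by simp)]
      simp [List.append_assoc]

theorem pv_intercalate_two (sep a b : List Char) (zs : List (List Char)) :
    sep.intercalate (zs ++ [a, b]) = sep.intercalate (zs ++ [a ++ sep ++ b]) := by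
  cases zs with
  | nil => simp [List.intercalate, List.intersperse]
  | cons z ws =>
    have h1 : (z :: ws) ++ [a, b] = ((z :: ws) ++ [a]) ++ [b] := by simp
    rw [h1, pv_intercalate_snoc _ _ _ (by simp), pv_intercalate_snoc _ _ _ (by simp),
        pv_intercalate_snoc _ _ _ (by simp)]
    simp [List.append_assoc]

-- join-of-go invariant: joining the pieces produced by splitOn.go reconstructs the input
theorem pv_join_go (sep : List Char) (hsep : sep ≠ []) :
    ∀ (fuel : Nat) (l cur : List Char) (acc : List (List Char)), l.length ≤ fuel →
      sep.intercalate (PySem.Chars.splitOn.go sep fuel l cur acc)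
        = sep.intercalate (acc.reverse ++ [cur.reverse ++ l]) := by
  intro fuel
  induction fuel with
  | zero =>
    intro l cur acc hl
    have : l = [] := List.length_eq_zero_iff.mp (Nat.le_zero.mp hl)
    subst this
    simp [PySem.Chars.splitOn.go]
  | succ n ih =>
    intro l cur acc hl
    cases l with
    | nil => simp [PySem.Chars.splitOn.go]
    | cons c rest =>
      by_cases hp : sep.isPrefixOf (c :: rest) = true
      · obtain ⟨t, ht⟩ := List.isPrefixOf_iff_prefix.mp hp
        have hdrop : List.drop sep.length (c :: rest) = t := by rw [← ht]; simp
        have hstep : PySem.Chars.splitOn.go sep (n+1) (c :: rest) cur acc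
            = PySem.Chars.splitOn.go sep n t [] (cur.reverse :: acc) := by
          simp [PySem.Chars.splitOn.go, hp, hdrop]
        have hs1 : 1 ≤ sep.length := by
          cases sep with | nil => exact absurd rfl hsep | cons _ _ => simp
        have htlen : t.length ≤ n := by
          have : (c :: rest).length = sep.length + t.length := by rw [← ht]; simp
          simp only [List.length_cons] at this hl
          omega
        rw [hstep, ih _ _ _ htlen, ← ht]
        simp only [List.reverse_cons, List.reverse_nil, List.nil_append, List.append_assoc,
          List.cons_append]
        rw [pv_intercalate_two]
        simp [List.append_assoc]
      · have hstep : PySem.Chars.splitOn.go sep (n+1) (c :: rest) cur acc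
            = PySem.Chars.splitOn.go sep n rest (c :: cur) acc := by
          simp [PySem.Chars.splitOn.go, hp]
        have hrlen : rest.length ≤ n := by simp at hl; omega
        rw [hstep, ih _ _ _ hrlen]
        simp [List.append_assoc]

theorem pv_join_splitOn (l : List Char) :
    (['/'] : List Char).intercalate (PySem.Chars.splitOn l ['/']) = l := by
  have h := pv_join_go ['/'] (by simp) (l.length + 1) l [] [] (by omega)
  simpa [PySem.Chars.splitOn, List.intercalate, List.intersperse] using h

-- ===== VERDICT (by name: the statement is the Claim_ definition above) =====
theorem flip_fen_py_spec : Claim_equal_flip_fen_py := by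
  intro fen _
  unfold Spec_flip_fen_py flip_fen_py flip_fen_py_alt
  rw [PySem.List.slice?_none_none_neg_one]
  apply congrArg String.ofList
  set l := fen.toList with hl
  set rows := PySem.Chars.splitOn l ['/'] with hrows
  rw [pv_foldl_push, List.nil_append, Option.getD_some]
  have hswap : (['/'] : List Char).map pvSwap = ['/'] := by decide
  calc PySem.Chars.join ['/'] (rows.reverse.map pvFlipRowA)
      = (['/'] : List Char).intercalate ((rows.map (fun r => (r.map pvSwap).reverse)).reverse) := by
        rw [PySem.Chars.join, ← List.map_reverse]
        congr 1
        exact List.map_congr_left (fun r _ => pvFlipRowA_eq r)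
    _ = (['/'] : List Char).intercalate (((rows.map (List.map pvSwap)).map List.reverse).reverse) := by
        simp [List.map_map, Function.comp_def]
    _ = ((['/'] : List Char).intercalate (rows.map (List.map pvSwap))).reverse := by
        rw [pv_reverse_intercalate]; simp
    _ = (((['/'] : List Char).intercalate rows).map pvSwap).reverse := by
        rw [pv_map_intercalate, hswap]
    _ = (l.map pvSwap).reverse := by rw [pv_join_splitOn]
    _ = l.reverse.map pvSwap := by rw [List.map_reverse]
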